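-- pv_equiv track=rewrite | github.com/mukesh-Guntumadugu/Dance_Dance_Prompting | sort_and_analyze_beatmaps.py | is_gallop
-- ===== SOURCE A (Python) =====
-- def is_gallop(active_list: list[list[int]]) -> bool:
--     """Un-even rhythm: a jump sandwiched between singles, or a quick 3-note burst."""
--     if len(active_list) < 3:
--         return False
--     for i in range(len(active_list) - 2):
--         a, b, c = active_list[i], active_list[i+1], active_list[i+2]
--         if len(a) == 1 and len(b) >= 2 and len(c) == 1:
--             return True
--         if len(a) >= 2 and len(b) == 1 and len(c) >= 2:
--             return True
--     return False
-- ===== SOURCE B (Python) =====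
-- def is_gallop(active_list: list[list[int]]) -> bool:
--     """Un-even rhythm: a jump sandwiched between singles, or a single between jumps.
--
--     Build a category signature ('S' single, 'J' jump/chord, 'Z' empty), then
--     look for the gallop shapes as substrings of the signature.
--     """
--     sig = ''.join('S' if len(r) == 1 else 'J' if len(r) >= 2 else 'Z'
--                   for r in active_list)
--     return 'SJS' in sig or 'JSJ' in sig
-- ===== Notes on version B (the rewrite author's own statement) =====
-- stated objective: idiomatic
-- what changed: Replaces the explicit index loop over triples of rows with a two-pass decomposition: map each row to a category character ('S'/'J'/'Z') building a signature string, then test for the substrings 'SJS' and 'JSJ'.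
import Mathlib
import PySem

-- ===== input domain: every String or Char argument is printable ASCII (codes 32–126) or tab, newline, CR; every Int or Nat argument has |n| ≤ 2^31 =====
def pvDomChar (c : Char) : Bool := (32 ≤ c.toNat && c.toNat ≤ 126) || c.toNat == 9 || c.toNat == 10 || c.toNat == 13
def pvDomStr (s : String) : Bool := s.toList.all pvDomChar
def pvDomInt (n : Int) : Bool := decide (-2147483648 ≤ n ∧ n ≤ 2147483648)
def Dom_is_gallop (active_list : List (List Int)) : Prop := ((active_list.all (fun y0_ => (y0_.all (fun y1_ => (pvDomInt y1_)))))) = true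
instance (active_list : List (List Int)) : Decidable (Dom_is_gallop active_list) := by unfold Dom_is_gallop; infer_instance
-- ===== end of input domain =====

-- B re-implements the triple-window index scan as: map rows to a category signature, then substring search; same behaviour, different decomposition (no speed claim).

-- ===== PORT A =====
-- A: guard len < 3, then index loop over i in range(len-2) testing the two window shapes (early return True = any).
def is_gallop (active_list : List (List Int)) : Bool :=
  if active_list.length < 3 then false
  else
    (PySem.List.pyRange 0 ((active_list.length : Int) - 2) 1).any (fun i =>
      let a := PySem.List.pyGetD active_list i []
      let b := PySem.List.pyGetD active_list (i + 1) []
      let c := PySem.List.pyGetD active_list (i + 2) []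
      (a.length == 1 && decide (2 ≤ b.length) && c.length == 1) ||
      (decide (2 ≤ a.length) && b.length == 1 && decide (2 ≤ c.length)))

-- ===== PORT B =====
-- category of one row: 'S' single, 'J' jump/chord (≥2 notes), 'Z' empty
def gallopCat (r : List Int) : Char :=
  if r.length == 1 then 'S' else if decide (2 ≤ r.length) then 'J' else 'Z'

-- hand port of Python's `pat in sig` for a fixed 3-character pattern: sliding substring search; exact on all inputs
def gallopSub3 (x y z : Char) : List Char → Bool
  | [] => false
  | a :: rest =>
      (match rest with
       | b :: c :: _ => a == x && b == y && c == z
       | _ => false) || gallopSub3 x y z rest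

def is_gallop_alt (active_list : List (List Int)) : Bool :=
  let sig := active_list.map gallopCat
  gallopSub3 'S' 'J' 'S' sig || gallopSub3 'J' 'S' 'J' sig

-- ===== PRECONDITION & SPEC =====
def Spec_is_gallop (active_list : List (List Int)) (out : Bool) : Prop := out = is_gallop_alt active_list
instance (active_list : List (List Int)) (out : Bool) : Decidable (Spec_is_gallop active_list out) := by unfold Spec_is_gallop; infer_instance

-- ===== CLAIM (what is proved, stated in full; the proofs are below) =====
def Claim_equal_is_gallop : Prop := ∀ (active_list : List (List Int)), Dom_is_gallop active_list → Spec_is_gallop active_list (is_gallop active_list)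

-- ===== LEMMAS AND PROOFS =====

-- the window condition both programs test, and a structural recursion over the triple windows
def gallopCond (a b c : List Int) : Bool :=
  (a.length == 1 && decide (2 ≤ b.length) && c.length == 1) ||
  (decide (2 ≤ a.length) && b.length == 1 && decide (2 ≤ c.length))

def gallopWin : List (List Int) → Bool
  | a :: b :: c :: rest => gallopCond a b c || gallopWin (b :: c :: rest)
  | _ => false

theorem cat_head (a b c : List Int) :
    ((gallopCat a == 'S' && gallopCat b == 'J' && gallopCat c == 'S') ||
     (gallopCat a == 'J' && gallopCat b == 'S' && gallopCat c == 'J')) = gallopCond a b c := by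
  unfold gallopCat gallopCond
  by_cases h1 : a.length = 1 <;> by_cases h2 : 2 ≤ a.length <;>
  by_cases h3 : b.length = 1 <;> by_cases h4 : 2 ≤ b.length <;>
  by_cases h5 : c.length = 1 <;> by_cases h6 : 2 ≤ c.length <;>
  first
  | (exfalso; omega)
  | simp [h1, h2, h3, h4, h5, h6]

theorem alt_eq_win (l : List (List Int)) : is_gallop_alt l = gallopWin l := by
  induction l with
  | nil => rfl
  | cons a t ih =>
    match t with
    | [] => rfl
    | [b] => rfl
    | b :: c :: rest =>
      simp only [is_gallop_alt, List.map] at ih ⊢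
      rw [gallopSub3, gallopSub3]
      rw [show ∀ p q r s : Bool, ((p || q) || (r || s)) = ((p || r) || (q || s)) from by decide]
      rw [show gallopWin (a :: b :: c :: rest) = (gallopCond a b c || gallopWin (b :: c :: rest)) from rfl]
      rw [← ih]
      congr 1
      exact cat_head a b c

theorem win_iff (l : List (List Int)) :
    gallopWin l = true ↔
      ∃ k, k + 2 < l.length ∧
        gallopCond (l.getD k []) (l.getD (k+1) []) (l.getD (k+2) []) = true := by
  induction l with
  | nil =>
    refine ⟨fun h => by simp [gallopWin] at h, ?_⟩
    rintro ⟨k, hk, -⟩; simp at hk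
  | cons a t ih =>
    match t with
    | [] =>
      refine ⟨fun h => by simp [gallopWin] at h, ?_⟩
      rintro ⟨k, hk, -⟩
      simp only [List.length_cons, List.length_nil] at hk; omega
    | [b] =>
      refine ⟨fun h => by simp [gallopWin] at h, ?_⟩
      rintro ⟨k, hk, -⟩
      simp only [List.length_cons, List.length_nil] at hk; omega
    | b :: c :: rest =>
      constructor
      · intro h
        rcases (by simpa [gallopWin] using h :
            gallopCond a b c = true ∨ gallopWin (b :: c :: rest) = true) with h | h
        · exact ⟨0, by simp, by simpa using h⟩
        · obtain ⟨k, hk, hc⟩ := ih.mp h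
          refine ⟨k + 1, by simp at hk ⊢; omega, ?_⟩
          rw [show k + 1 + 2 = (k + 2) + 1 from by omega]
          simpa [List.getD_cons_succ] using hc
      · rintro ⟨k, hk, hc⟩
        match k with
        | 0 =>
          have hc' : gallopCond a b c = true := by simpa using hc
          simp only [gallopWin, hc', Bool.true_or]
        | Nat.succ k =>
          have htail : gallopWin (b :: c :: rest) = true := by
            apply ih.mpr
            refine ⟨k, by simp at hk ⊢; omega, ?_⟩
            rw [show k + 1 + 2 = (k + 2) + 1 from by omega] at hc
            simpa [List.getD_cons_succ] using hc
          simp only [gallopWin, htail, Bool.or_true]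

theorem a_eq_win (l : List (List Int)) : is_gallop l = gallopWin l := by
  by_cases h : l.length < 3
  · have hw : gallopWin l = false := by
      match l, h with
      | [], _ => rfl
      | [_], _ => rfl
      | [_, _], _ => rfl
      | _ :: _ :: _ :: _, h => exact absurd h (by simp)
    simp [is_gallop, h, hw]
  · rw [is_gallop, if_neg h]
    have h3 : 3 ≤ l.length := by omega
    apply Bool.eq_iff_iff.mpr
    rw [List.any_eq_true, win_iff]
    constructor
    · rintro ⟨i, hmem, hf⟩
      rw [PySem.List.mem_pyRange_one] at hmem
      obtain ⟨h0, hlt⟩ := hmem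
      have hik : ((i.toNat : Nat) : Int) = i := Int.toNat_of_nonneg h0
      refine ⟨i.toNat, by omega, ?_⟩
      rw [← hik] at hf
      rw [show ((i.toNat : Nat) : Int) + 1 = ((i.toNat + 1 : Nat) : Int) from by push_cast; ring,
          show ((i.toNat : Nat) : Int) + 2 = ((i.toNat + 2 : Nat) : Int) from by push_cast; ring] at hf
      simp only [PySem.List.pyGetD_natCast] at hf
      exact hf
    · rintro ⟨k, hk, hc⟩
      refine ⟨(k : Int), PySem.List.mem_pyRange_one.mpr ⟨by positivity, by omega⟩, ?_⟩
      rw [show ((k : Nat) : Int) + 1 = ((k + 1 : Nat) : Int) from by push_cast; ring,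
          show ((k : Nat) : Int) + 2 = ((k + 2 : Nat) : Int) from by push_cast; ring]
      simp only [PySem.List.pyGetD_natCast]
      exact hc

-- ===== VERDICT (by name: the statement is the Claim_ definition above) =====
theorem is_gallop_spec : Claim_equal_is_gallop := by
  intro l _
  unfold Spec_is_gallop
  rw [a_eq_win, alt_eq_win]
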